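-- pv_equiv track=rewrite | github.com/aski94/UlohyPVA | uloha6.py | optimize_lists
-- ===== SOURCE A (Python) =====
-- def optimize_lists(racks, lists):
--     optimized_lists = []
--
--     for shopping_list in lists:
--         optimized_list = []
--         remaining_items = []
--
--         for item in shopping_list:
--             found = False
--             for rack_num, rack in enumerate(racks):
--                 for rack_item in rack:
--                     if rack_item.lower() == item.lower():
--                         optimized_list.append((item, rack_item, rack_num))
--                         found = True
--                         break
--                 if found:
--                     break
--
--             if not found:
--                 for rack_num, rack in enumerate(racks):
--                     for rack_item in rack:
--                         if item.lower() in rack_item.lower():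
--                             optimized_list.append((item, rack_item, rack_num))
--                             found = True
--                             break
--                     if found:
--                         break
--
--             if not found:
--                 remaining_items.append((item, item, None))
--
--         optimized_list.extend(remaining_items)
--         optimized_list.sort(key=lambda x: (x[2] is None, x[2]))
--         optimized_lists.append(optimized_list)
--
--     return optimized_lists
-- ===== SOURCE B (Python) =====
-- def _find(racks, item):
--     key = item.lower()
--     sub = None
--     for rack_num, rack in enumerate(racks):
--         for rack_item in rack:
--             low = rack_item.lower()
--             if low == key:
--                 return (item, rack_item, rack_num)
--             if sub is None and key in low:
--                 sub = (item, rack_item, rack_num)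
--     return sub
--
--
-- def optimize_lists(racks, lists):
--     out = []
--     for shopping_list in lists:
--         matched = []
--         remaining = []
--         for item in shopping_list:
--             hit = _find(racks, item)
--             if hit is not None:
--                 matched.append(hit)
--             else:
--                 remaining.append((item, item, None))
--         matched.extend(remaining)
--         matched.sort(key=lambda x: (x[2] is None, x[2]))
--         out.append(matched)
--     return out
-- ===== Notes on version B (the rewrite author's own statement) =====
-- stated objective: alternative
-- what changed: Per item, A's two sequential full scans over all racks (exact pass, then substring pass) are fused into one combined pass that returns on the first exact match while remembering the first substring candidate.
import Mathlib
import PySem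

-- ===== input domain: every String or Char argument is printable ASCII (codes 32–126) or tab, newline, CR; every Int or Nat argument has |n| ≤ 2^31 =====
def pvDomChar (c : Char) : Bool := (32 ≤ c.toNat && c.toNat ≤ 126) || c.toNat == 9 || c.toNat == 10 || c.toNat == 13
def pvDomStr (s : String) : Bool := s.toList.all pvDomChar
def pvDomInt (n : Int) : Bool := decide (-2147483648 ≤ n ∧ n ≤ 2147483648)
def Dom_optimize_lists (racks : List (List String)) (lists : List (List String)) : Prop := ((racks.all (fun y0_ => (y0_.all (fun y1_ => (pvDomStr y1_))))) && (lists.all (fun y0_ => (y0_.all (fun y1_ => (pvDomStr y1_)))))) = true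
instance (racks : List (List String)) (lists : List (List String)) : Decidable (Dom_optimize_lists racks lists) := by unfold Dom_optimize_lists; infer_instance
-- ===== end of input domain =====

-- B fuses A's two sequential scans over the racks into one combined pass per item
-- (return on first exact match, remember the first substring candidate); same result, one scan instead of two.

-- ===== PORT A =====
-- inner 'for rack_item in rack' loop of the exact-match pass (break = return some)
def aRackExact (item : String) : List String → Option String
  | [] => none
  | r :: rs =>
    if PySem.Str.lower r = PySem.Str.lower item then some r else aRackExact item rs

-- 'for rack_num, rack in enumerate(racks)' of the exact-match pass
def aExact (item : String) (n : Int) : List (List String) → Option (String × Int)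
  | [] => none
  | rack :: rest =>
    match aRackExact item rack with
    | some r => some (r, n)
    | none => aExact item (n + 1) rest

-- inner loop of the substring pass
def aRackSub (item : String) : List String → Option String
  | [] => none
  | r :: rs =>
    if PySem.Str.isIn (PySem.Str.lower item) (PySem.Str.lower r) then some r else aRackSub item rs

-- outer loop of the substring pass
def aSub (item : String) (n : Int) : List (List String) → Option (String × Int)
  | [] => none
  | rack :: rest =>
    match aRackSub item rack with
    | some r => some (r, n)
    | none => aSub item (n + 1) rest

-- one iteration of 'for item in shopping_list': state = (optimized_list, remaining_items)
def aStep (racks : List (List String))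
    (st : List (String × String × Option Int) × List (String × String × Option Int))
    (item : String) :
    List (String × String × Option Int) × List (String × String × Option Int) :=
  match aExact item 0 racks with
  | some (r, n) => (st.1 ++ [(item, r, some n)], st.2)
  | none =>
    match aSub item 0 racks with
    | some (r, n) => (st.1 ++ [(item, r, some n)], st.2)
    | none => (st.1, st.2 ++ [(item, item, none)])

-- sort key (x[2] is None, x[2]): exact — the Int component is only compared between
-- entries whose key is 'some' (isNone false), and all 'none' entries tie, as in Python.
def optimize_lists (racks : List (List String)) (lists : List (List String)) :
    List (List (String × String × Option Int)) :=
  lists.foldl (fun acc sl =>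
    let st := sl.foldl (aStep racks) ([], [])
    acc ++ [PySem.List.sorted2 (st.1 ++ st.2)
      (fun x => x.2.2.isNone) (fun x => x.2.2.getD 0)]) []

-- ===== PORT B =====
-- inner loop of _find over one rack: .inl = returned triple (exact hit), .inr = sub after the rack
def bRack (item key : String) (n : Int) :
    List String → Option (String × String × Option Int) →
    (String × String × Option Int) ⊕ Option (String × String × Option Int)
  | [], sub => Sum.inr sub
  | r :: rs, sub =>
    let low := PySem.Str.lower r
    if low = key then Sum.inl (item, r, some n)
    else bRack item key n rs
      (if sub.isNone && PySem.Str.isIn key low then some (item, r, some n) else sub)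

-- 'for rack_num, rack in enumerate(racks)' of _find
def bFindGo (item key : String) (n : Int) :
    List (List String) → Option (String × String × Option Int) →
    Option (String × String × Option Int)
  | [], sub => sub
  | rack :: rest, sub =>
    match bRack item key n rack sub with
    | Sum.inl t => some t
    | Sum.inr sub' => bFindGo item key (n + 1) rest sub'

def bFind (racks : List (List String)) (item : String) :
    Option (String × String × Option Int) :=
  bFindGo item (PySem.Str.lower item) 0 racks none

def optimize_lists_alt (racks : List (List String)) (lists : List (List String)) :
    List (List (String × String × Option Int)) :=
  lists.foldl (fun out sl =>
    let p := sl.foldl (fun st item =>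
      match bFind racks item with
      | some t => (st.1 ++ [t], st.2)
      | none => (st.1, st.2 ++ [(item, item, none)])) ([], [])
    out ++ [PySem.List.sorted2 (p.1 ++ p.2)
      (fun x => x.2.2.isNone) (fun x => x.2.2.getD 0)]) []

-- ===== PRECONDITION & SPEC =====
def Spec_optimize_lists (racks : List (List String)) (lists : List (List String)) (out : List (List (String × String × Option Int))) : Prop := out = optimize_lists_alt racks lists
instance (racks : List (List String)) (lists : List (List String)) (out : List (List (String × String × Option Int))) : Decidable (Spec_optimize_lists racks lists out) := by unfold Spec_optimize_lists; infer_instance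

-- ===== CLAIM (what is proved, stated in full; the proofs are below) =====
def Claim_equal_optimize_lists : Prop := ∀ (racks : List (List String)) (lists : List (List String)), Dom_optimize_lists racks lists → Spec_optimize_lists racks lists (optimize_lists racks lists)

-- ===== LEMMAS AND PROOFS =====

-- one rack of B's combined pass = exact scan, else sub carried/updated by the substring scan
theorem bRack_eq (item : String) (n : Int) (rack : List String)
    (sub : Option (String × String × Option Int)) :
    bRack item (PySem.Str.lower item) n rack sub =
      match aRackExact item rack with
      | some r => Sum.inl (item, r, some n)
      | none => Sum.inr (sub.or ((aRackSub item rack).map (fun r => (item, r, some n)))) := by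
  induction rack generalizing sub with
  | nil => simp [bRack, aRackExact, aRackSub]
  | cons r rs ih =>
    by_cases he : PySem.Str.lower r = PySem.Str.lower item
    · simp [bRack, aRackExact, he]
    · have hne : ¬ (PySem.Str.lower r = PySem.Str.lower item) := he
      simp only [bRack, aRackExact, aRackSub, hne, ih]
      cases sub with
      | some s => simp
      | none =>
        cases hx : aRackExact item rs with
        | some r' => simp [hx]
        | none =>
          by_cases hs : PySem.Chars.isIn (PySem.Chars.lower item.toList) (PySem.Chars.lower r.toList) = true <;>
            simp [hx, hs]

theorem aSub_cons (item : String) (n : Int) (rack : List String) (rest : List (List String)) :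
    aSub item n (rack :: rest) =
      ((aRackSub item rack).map (fun r => (r, n))).or (aSub item (n + 1) rest) := by
  cases h : aRackSub item rack <;> simp [aSub, h]

theorem bFindGo_eq (item : String) (racks : List (List String)) (n : Int)
    (sub : Option (String × String × Option Int)) :
    bFindGo item (PySem.Str.lower item) n racks sub =
      match aExact item n racks with
      | some (r, m) => some (item, r, some m)
      | none => sub.or ((aSub item n racks).map (fun rm => (item, rm.1, some rm.2))) := by
  induction racks generalizing n sub with
  | nil => simp [bFindGo, aExact, aSub]
  | cons rack rest ih =>
    simp only [bFindGo, bRack_eq]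
    cases he : aRackExact item rack with
    | some r => simp [aExact, he]
    | none =>
      simp only [ih, aExact, he, aSub_cons]
      cases h : aExact item (n + 1) rest with
      | some rm => rfl
      | none =>
        cases hs : aRackSub item rack with
        | some r => cases sub <;> simp
        | none => cases sub <;> simp

theorem bFind_eq (racks : List (List String)) (item : String) :
    bFind racks item =
      match aExact item 0 racks with
      | some (r, m) => some (item, r, some m)
      | none => (aSub item 0 racks).map (fun rm => (item, rm.1, some rm.2)) := by
  simp only [bFind, bFindGo_eq]
  cases aExact item 0 racks with
  | some rm => rfl
  | none => simp

theorem step_eq (racks : List (List String))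
    (st : List (String × String × Option Int) × List (String × String × Option Int))
    (item : String) :
    (match bFind racks item with
      | some t => (st.1 ++ [t], st.2)
      | none => (st.1, st.2 ++ [(item, item, none)])) = aStep racks st item := by
  simp only [bFind_eq, aStep]
  cases aExact item 0 racks with
  | some rm => rfl
  | none => cases aSub item 0 racks with
    | some rm => rfl
    | none => rfl

theorem inner_fold_eq (racks : List (List String)) (sl : List String)
    (st : List (String × String × Option Int) × List (String × String × Option Int)) :
    sl.foldl (fun st item =>
      match bFind racks item with
      | some t => (st.1 ++ [t], st.2)
      | none => (st.1, st.2 ++ [(item, item, none)])) st =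
    sl.foldl (aStep racks) st := by
  have h : (fun st item =>
      match bFind racks item with
      | some t => (st.1 ++ [t], st.2)
      | none => (st.1, st.2 ++ [(item, item, none)])) = aStep racks :=
    funext fun st => funext fun item => step_eq racks st item
  rw [h]

theorem optimize_lists_eq (racks : List (List String)) (lists : List (List String)) :
    optimize_lists racks lists = optimize_lists_alt racks lists := by
  unfold optimize_lists optimize_lists_alt
  induction lists using List.reverseRecOn with
  | nil => rfl
  | append_singleton t l ih => simp only [List.foldl_append, List.foldl_cons, List.foldl_nil, ih, inner_fold_eq]

-- ===== VERDICT (by name: the statement is the Claim_ definition above) =====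
theorem optimize_lists_spec : Claim_equal_optimize_lists := by
  intro racks lists _
  unfold Spec_optimize_lists
  exact optimize_lists_eq racks lists
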